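-- pv_equiv track=rewrite | github.com/zhuyiyi-123/SOO-Bench | revive_hybrid/build/lib/revive/computation/funs_parser.py | get_fn_list
-- ===== SOURCE A (Python) =====
-- def get_fn_list(origin_code_list):
--     fn_start_index = []
--     fn_stop_index = []
--     for i,code in enumerate(origin_code_list):
--         if code.startswith('def '):
--             if fn_start_index:
--                 fn_stop_index.append(i)
--             fn_start_index.append(i)
--     fn_stop_index.append(i+1)
--
--     return [origin_code_list[i:j] for i,j in zip(fn_start_index,fn_stop_index)]
-- ===== SOURCE B (Python) =====
-- def get_fn_list(origin_code_list):
--     blocks = []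
--     cur = None
--     for line in origin_code_list:
--         if line.startswith('def '):
--             if cur is not None:
--                 blocks.append(cur)
--             cur = [line]
--         elif cur is not None:
--             cur.append(line)
--     if cur is not None:
--         blocks.append(cur)
--     return blocks
-- ===== Notes on version B (the rewrite author's own statement) =====
-- stated objective: simpler
-- what changed: B builds the blocks directly in one accumulator pass (current block + finished blocks), with no index tracking, no start/stop lists and no slicing, where A records start/stop index lists and slices the input afterwards.
-- outside the precondition, e.g. on get_fn_list([]): A raises UnboundLocalError, B returns []
import Mathlib
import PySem

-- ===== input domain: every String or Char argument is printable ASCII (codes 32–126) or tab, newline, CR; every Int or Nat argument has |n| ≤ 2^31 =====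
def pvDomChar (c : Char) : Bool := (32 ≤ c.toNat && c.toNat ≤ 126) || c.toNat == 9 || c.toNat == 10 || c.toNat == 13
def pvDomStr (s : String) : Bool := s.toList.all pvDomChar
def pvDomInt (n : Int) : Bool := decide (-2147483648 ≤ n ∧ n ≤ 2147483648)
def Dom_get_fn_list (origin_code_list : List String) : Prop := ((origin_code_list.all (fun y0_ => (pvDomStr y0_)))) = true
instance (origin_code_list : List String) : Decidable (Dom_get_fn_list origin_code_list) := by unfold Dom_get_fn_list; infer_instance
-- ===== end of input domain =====

-- B replaces A's start/stop index bookkeeping and after-the-fact slicing by one accumulator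
-- pass that builds the blocks directly (objective: simpler).

-- ===== PORT A =====
-- the for-loop over enumerate, keeping (fn_start_index, fn_stop_index)
def get_fn_list (origin_code_list : List String) : List (List String) :=
  let st := (PySem.List.enumerate origin_code_list 0).foldl
    (fun (acc : List Int × List Int) (p : Int × String) =>
      if PySem.Str.startswith p.2 "def " then
        (acc.1 ++ [p.1], if acc.1.isEmpty then acc.2 else acc.2 ++ [p.1])
      else acc)
    ([], [])
  -- after the loop i = len-1; Python's fn_stop_index.append(i+1).  On [] Python raises
  -- UnboundLocalError (i unbound) — Pre_ excludes that input.
  let fn_stop_index := st.2 ++ [((origin_code_list.length : Int) - 1) + 1]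
  (st.1.zip fn_stop_index).map
    (fun ij => PySem.List.slice origin_code_list (some ij.1) (some ij.2))

-- ===== PORT B =====
-- one pass with state (blocks, cur : Option current-block); flush cur at each 'def ' and at the end
def get_fn_list_alt (origin_code_list : List String) : List (List String) :=
  let st := origin_code_list.foldl
    (fun (acc : List (List String) × Option (List String)) (line : String) =>
      if PySem.Str.startswith line "def " then
        ((match acc.2 with | some c => acc.1 ++ [c] | none => acc.1), some [line])
      else
        match acc.2 with
        | some c => (acc.1, some (c ++ [line]))
        | none => (acc.1, none))
    ([], none)
  match st.2 with
  | some c => st.1 ++ [c]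
  | none => st.1

-- ===== PRECONDITION & SPEC =====
-- Pre_ excludes only the empty list, on which the Python A raises UnboundLocalError
-- (its loop variable i is never bound); B returns [] there.
def Pre_get_fn_list (origin_code_list : List String) : Prop := origin_code_list ≠ []
instance (origin_code_list : List String) : Decidable (Pre_get_fn_list origin_code_list) := by unfold Pre_get_fn_list; infer_instance
def pvWitness_get_fn_list : List String := ["def f():", "  return 1", "def g():"]

def Spec_get_fn_list (origin_code_list : List String) (out : List (List String)) : Prop := out = get_fn_list_alt origin_code_list
instance (origin_code_list : List String) (out : List (List String)) : Decidable (Spec_get_fn_list origin_code_list out) := by unfold Spec_get_fn_list; infer_instance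

-- ===== CLAIM (what is proved, stated in full; the proofs are below) =====
def Claim_equal_get_fn_list : Prop := ∀ (origin_code_list : List String), Dom_get_fn_list origin_code_list → Pre_get_fn_list origin_code_list → Spec_get_fn_list origin_code_list (get_fn_list origin_code_list)

-- ===== LEMMAS AND PROOFS =====

-- the list of indices (from the front) of lines starting with 'def '
def startsN : List String → List Nat
  | [] => []
  | x :: xs =>
    if PySem.Str.startswith x "def " then 0 :: (startsN xs).map (· + 1)
    else (startsN xs).map (· + 1)

-- the zip-of-boundaries/slice view of A's result, over Nat indices
def zslice (l : List String) (s : List Nat) (n : Nat) : List (List String) :=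
  (s.zip (s.drop 1 ++ [n])).map (fun ij => (l.drop ij.1).take (ij.2 - ij.1))

def blocksN (l : List String) : List (List String) := zslice l (startsN l) l.length

-- the accumulator view of B's result
def Rf (cur : List String) : List String → List (List String)
  | [] => [cur]
  | x :: xs =>
    if PySem.Str.startswith x "def " then cur :: Rf [x] xs else Rf (cur ++ [x]) xs

def Gf : List String → List (List String)
  | [] => []
  | x :: xs => if PySem.Str.startswith x "def " then Rf [x] xs else Gf xs

theorem startsN_cons (x : String) (xs : List String) :
    startsN (x :: xs) = if PySem.Str.startswith x "def " then 0 :: (startsN xs).map (· + 1)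
      else (startsN xs).map (· + 1) := rfl

theorem Rf_cons (cur : List String) (x : String) (xs : List String) :
    Rf cur (x :: xs) = if PySem.Str.startswith x "def " then cur :: Rf [x] xs
      else Rf (cur ++ [x]) xs := rfl

theorem Gf_cons (x : String) (xs : List String) :
    Gf (x :: xs) = if PySem.Str.startswith x "def " then Rf [x] xs else Gf xs := rfl

-- the loop bodies of the two ports, named for the proofs (syntactically identical to the ports')
def stepA (acc : List Int × List Int) (p : Int × String) : List Int × List Int :=
  if PySem.Str.startswith p.2 "def " then
    (acc.1 ++ [p.1], if acc.1.isEmpty then acc.2 else acc.2 ++ [p.1])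
  else acc

def stepB (acc : List (List String) × Option (List String)) (line : String) :
    List (List String) × Option (List String) :=
  if PySem.Str.startswith line "def " then
    ((match acc.2 with | some c => acc.1 ++ [c] | none => acc.1), some [line])
  else
    match acc.2 with
    | some c => (acc.1, some (c ++ [line]))
    | none => (acc.1, none)

def finishB (st : List (List String) × Option (List String)) : List (List String) :=
  match st.2 with
  | some c => st.1 ++ [c]
  | none => st.1

theorem startsN_append_noDef (xs : List String) : ∀ (ps : List String),
    (∀ a ∈ ps, PySem.Str.startswith a "def " = false) →
    startsN (ps ++ xs) = (startsN xs).map (· + ps.length) := by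
  intro ps
  induction ps with
  | nil => intro _; simp
  | cons a ps ih =>
    intro h
    have ha : PySem.Str.startswith a "def " = false := h a (by simp)
    rw [List.cons_append, startsN_cons, if_neg (by simpa using ha),
      ih (fun b hb => h b (by simp [hb])), List.map_map]
    apply List.map_congr_left
    intro j _
    simp [Function.comp]
    omega

theorem zslice_shift (pre l : List String) (s : List Nat) :
    zslice (pre ++ l) (s.map (· + pre.length)) (pre.length + l.length) = zslice l s l.length := by
  unfold zslice
  have h1 : (s.map (· + pre.length)).drop 1 ++ [pre.length + l.length]
      = (s.drop 1 ++ [l.length]).map (· + pre.length) := by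
    simp [Nat.add_comm]
  rw [h1, List.zip_map, List.map_map]
  apply List.map_congr_left
  intro ij _
  simp only [Function.comp, Prod.map]
  have h2 : ij.1 + pre.length = pre.length + ij.1 := Nat.add_comm _ _
  rw [h2, ← List.drop_drop, List.drop_left]
  congr 1
  omega

theorem main_R (xs : List String) : ∀ (p : String) (ps : List String),
    PySem.Str.startswith p "def " = true →
    (∀ a ∈ ps, PySem.Str.startswith a "def " = false) →
    blocksN (p :: (ps ++ xs)) = Rf (p :: ps) xs := by
  induction xs with
  | nil =>
    intro p ps hp hps
    have hps0 : startsN ps = [] := by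
      have := startsN_append_noDef ([] : List String) ps hps
      simpa [startsN] using this
    have hs : startsN (p :: ps) = [0] := by
      rw [startsN_cons, if_pos hp, hps0]
      rfl
    simp only [List.append_nil] at *
    rw [blocksN, hs]
    simp [zslice, Rf]
  | cons y ys ih =>
    intro p ps hp hps
    by_cases hy : PySem.Str.startswith y "def " = true
    · -- a new def starts: the first block is p :: ps, the rest shifts
      have hs : startsN (p :: (ps ++ y :: ys))
          = 0 :: (startsN (y :: ys)).map (· + (ps.length + 1)) := by
        rw [startsN_cons, if_pos hp, startsN_append_noDef (y :: ys) ps hps, List.map_map]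
        congr 1
      obtain ⟨m, M, hM⟩ : ∃ m M, (startsN (y :: ys)).map (· + (ps.length + 1)) = m :: M := by
        rw [startsN_cons, if_pos hy, List.map_cons]
        exact ⟨_, _, rfl⟩
      have hm : m = ps.length + 1 := by
        rw [startsN_cons, if_pos hy, List.map_cons] at hM
        simp at hM
        omega
      have hlen : (p :: (ps ++ y :: ys)).length = (ps.length + 1) + (y :: ys).length := by
        simp; omega
      have hzip : ((0 :: m :: M).zip ((m :: M) ++ [(ps.length + 1) + (y :: ys).length]))
          = (0, m) :: ((m :: M).zip (M ++ [(ps.length + 1) + (y :: ys).length])) := by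
        simp [List.zip]
      have htail : zslice (p :: (ps ++ y :: ys)) (m :: M) ((ps.length + 1) + (y :: ys).length)
          = zslice (y :: ys) (startsN (y :: ys)) (y :: ys).length := by
        have hl : p :: (ps ++ y :: ys) = (p :: ps) ++ (y :: ys) := by simp
        have hk : ps.length + 1 = (p :: ps).length := by simp
        rw [← hM, hl, hk]
        exact zslice_shift (p :: ps) (y :: ys) (startsN (y :: ys))
      have hfirst : ((p :: (ps ++ y :: ys)).drop 0).take (m - 0) = p :: ps := by
        rw [hm]
        have hl : p :: (ps ++ y :: ys) = (p :: ps) ++ (y :: ys) := by simp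
        have hk : ps.length + 1 = (p :: ps).length := by simp
        simp only [List.drop_zero, Nat.sub_zero, hl, hk]
        exact List.take_left
      rw [Rf_cons, if_pos hy, blocksN, hs, hM, hlen]
      unfold zslice
      simp only [List.drop_succ_cons, List.drop_zero]
      rw [hzip]
      simp only [List.map_cons]
      rw [hfirst]
      have h2 := htail
      unfold zslice at h2
      simp only [List.drop_succ_cons, List.drop_zero] at h2
      rw [h2]
      have h3 := ih y [] hy (by simp)
      simp only [List.nil_append] at h3
      rw [blocksN] at h3
      unfold zslice at h3
      rw [h3]
    · -- y continues the current block
      have h1 : p :: (ps ++ y :: ys) = p :: ((ps ++ [y]) ++ ys) := by simp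
      rw [h1, ih p (ps ++ [y]) hp ?hall, Rf_cons, if_neg (by simpa using hy)]
      · rfl
      case hall =>
        intro a ha
        rcases List.mem_append.mp ha with h | h
        · exact hps a h
        · simp at h; subst h; simpa using hy

theorem blocksN_eq_Gf (l : List String) : blocksN l = Gf l := by
  induction l with
  | nil => simp [blocksN, zslice, startsN, Gf]
  | cons x xs ih =>
    by_cases hx : PySem.Str.startswith x "def " = true
    · have h1 := main_R xs x [] hx (by simp)
      simp only [List.nil_append] at h1
      rw [h1, Gf_cons, if_pos hx]
    · have hs : startsN (x :: xs) = (startsN xs).map (· + 1) := by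
        rw [startsN_cons, if_neg (by simpa using hx)]
      have hshift := zslice_shift [x] xs (startsN xs)
      simp only [List.length_cons, List.length_nil, List.singleton_append] at hshift
      have hl : (x :: xs).length = 0 + 1 + xs.length := by simp only [List.length_cons]; omega
      rw [blocksN, hs, hl, hshift, ← blocksN, ih, Gf_cons, if_neg (by simpa using hx)]

theorem foldA (l : List String) : ∀ (k : Int) (s : List Int),
    (PySem.List.enumerate l k).foldl stepA (s, s.drop 1)
    = (s ++ (startsN l).map (fun (j : Nat) => k + (j : Int)),
       (s ++ (startsN l).map (fun (j : Nat) => k + (j : Int))).drop 1) := by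
  induction l with
  | nil => intro k s; simp [PySem.List.enumerate, startsN]
  | cons x xs ih =>
    intro k s
    rw [PySem.List.enumerate_cons, List.foldl_cons]
    by_cases hx : PySem.Str.startswith x "def " = true
    · have hstep : stepA (s, s.drop 1) (k, x) = (s ++ [k], (s ++ [k]).drop 1) := by
        unfold stepA
        rw [if_pos hx]
        cases s with
        | nil => simp
        | cons a s' => simp
      rw [hstep, ih (k + 1) (s ++ [k])]
      have heq : (s ++ [k]) ++ (startsN xs).map (fun (j : Nat) => (k + 1) + (j : Int))
          = s ++ (startsN (x :: xs)).map (fun (j : Nat) => k + (j : Int)) := by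
        rw [startsN_cons, if_pos hx, List.map_cons, List.map_map, List.append_assoc,
          List.singleton_append]
        have hh : (fun (j : Nat) => k + ((j : Nat) : Int)) 0 = k := by push_cast; ring
        congr 1
        congr 1
        · exact hh.symm
        · apply List.map_congr_left
          intro j _
          simp only [Function.comp]
          push_cast
          ring
      rw [heq]
    · have hstep : stepA (s, s.drop 1) (k, x) = (s, s.drop 1) := by
        unfold stepA
        rw [if_neg (by simpa using hx)]
      rw [hstep, ih (k + 1) s]
      have heq : (startsN (x :: xs)).map (fun (j : Nat) => k + (j : Int))
          = (startsN xs).map (fun (j : Nat) => (k + 1) + (j : Int)) := by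
        rw [startsN_cons, if_neg (by simpa using hx), List.map_map]
        apply List.map_congr_left
        intro j _
        simp [Function.comp]
        ring
      rw [heq]

theorem A_eq_blocksN (l : List String) : get_fn_list l = blocksN l := by
  show List.map (fun ij => PySem.List.slice l (some ij.1) (some ij.2))
      (((PySem.List.enumerate l 0).foldl stepA ([], [])).1.zip
        (((PySem.List.enumerate l 0).foldl stepA ([], [])).2 ++ [((l.length : Int) - 1) + 1]))
      = blocksN l
  have h0 : (([] : List Int), ([] : List Int)) = (([] : List Int), ([] : List Int).drop 1) := rfl
  rw [h0, foldA l 0 []]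
  simp only [List.nil_append]
  have hcast : (startsN l).map (fun (j : Nat) => (0 : Int) + (j : Int))
      = (startsN l).map (fun (j : Nat) => (j : Int)) := by
    apply List.map_congr_left; intro j _; ring
  have hn : ((l.length : Int) - 1) + 1 = (l.length : Int) := by ring
  rw [hcast, hn]
  have h2 : ((startsN l).map (fun (j : Nat) => (j : Int))).drop 1 ++ [(l.length : Int)]
      = ((startsN l).drop 1 ++ [l.length]).map (fun (j : Nat) => (j : Int)) := by
    simp
  rw [h2, List.zip_map, List.map_map]
  unfold blocksN zslice
  apply List.map_congr_left
  intro ij _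
  simp only [Function.comp, Prod.map]
  rw [PySem.List.slice_natCast]

theorem foldB_some (l : List String) : ∀ (blocks : List (List String)) (cur : List String),
    finishB (l.foldl stepB (blocks, some cur)) = blocks ++ Rf cur l := by
  induction l with
  | nil => intro blocks cur; simp [finishB, Rf]
  | cons x xs ih =>
    intro blocks cur
    rw [List.foldl_cons]
    by_cases hx : PySem.Str.startswith x "def " = true
    · have hstep : stepB (blocks, some cur) x = (blocks ++ [cur], some [x]) := by
        unfold stepB; rw [if_pos hx]
      rw [hstep, ih, Rf_cons, if_pos hx]
      simp
    · have hstep : stepB (blocks, some cur) x = (blocks, some (cur ++ [x])) := by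
        unfold stepB; rw [if_neg (by simpa using hx)]
      rw [hstep, ih, Rf_cons, if_neg (by simpa using hx)]

theorem foldB_none (l : List String) : ∀ (blocks : List (List String)),
    finishB (l.foldl stepB (blocks, none)) = blocks ++ Gf l := by
  induction l with
  | nil => intro blocks; simp [finishB, Gf]
  | cons x xs ih =>
    intro blocks
    rw [List.foldl_cons]
    by_cases hx : PySem.Str.startswith x "def " = true
    · have hstep : stepB (blocks, none) x = (blocks, some [x]) := by
        unfold stepB; rw [if_pos hx]
      rw [hstep, foldB_some, Gf_cons, if_pos hx]
    · have hstep : stepB (blocks, none) x = (blocks, none) := by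
        unfold stepB; rw [if_neg (by simpa using hx)]
      rw [hstep, ih, Gf_cons, if_neg (by simpa using hx)]

theorem B_eq_Gf (l : List String) : get_fn_list_alt l = Gf l := by
  show finishB (l.foldl stepB ([], none)) = Gf l
  rw [foldB_none]
  simp

-- ===== VERDICT (by name: the statement is the Claim_ definition above) =====
theorem get_fn_list_spec : Claim_equal_get_fn_list := by
  intro l _ _
  show get_fn_list l = get_fn_list_alt l
  rw [A_eq_blocksN, blocksN_eq_Gf, B_eq_Gf]
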